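-- pv_equiv track=rewrite | github.com/revilofe/revilofe.github.io | docs/section1/u03/practica/otrosRecursos/examenes/2324 - Isla/src/isla.py | crear_camino
-- ===== SOURCE A (Python) =====
-- FILAS = 0
--
-- COLUMNAS = 1
--
-- def crear_camino(posicion_tesoro: tuple, posicion_jugador: tuple) -> set:
--     """ Crea un camino desde la posición del jugador al tesoro.
--     :param posicion_tesoro: La posición del tesoro.
--     :param posicion_jugador: La posición del jugador.
--     :return: El camino desde la posición del jugador al tesoro.
--     """
--     camino = set()
--     jugador_x, jugador_y = posicion_jugador[FILAS], posicion_jugador[COLUMNAS]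
--     tesoro_x, tesoro_y = posicion_tesoro[FILAS], posicion_tesoro[COLUMNAS]
--     # Agregar la posición inicial del jugador al camino para garantizar que el tesoro sea alcanzable
--     camino.add((jugador_x, jugador_y))
--     while (jugador_x, jugador_y) != (tesoro_x, tesoro_y):
--         if jugador_x < tesoro_x:
--             jugador_x += 1
--         elif jugador_x > tesoro_x:
--             jugador_x -= 1
--         elif jugador_y < tesoro_y:
--             jugador_y += 1
--         elif jugador_y > tesoro_y:
--             jugador_y -= 1
--         camino.add((jugador_x, jugador_y))
--     return camino
-- ===== SOURCE B (Python) =====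
-- def crear_camino(posicion_tesoro: tuple, posicion_jugador: tuple) -> set:
--     """Camino parametrizado por la distancia Manhattan: la celda a distancia d
--     del jugador se calcula con una formula cerrada (primero avance en x, luego en y)."""
--     tesoro_x, tesoro_y = posicion_tesoro
--     jugador_x, jugador_y = posicion_jugador
--     dx = tesoro_x - jugador_x
--     dy = tesoro_y - jugador_y
--     sx = 1 if dx >= 0 else -1
--     sy = 1 if dy >= 0 else -1
--     adx = abs(dx)
--     ady = abs(dy)
--
--     def celda(d):
--         if d <= adx:
--             return (jugador_x + sx * d, jugador_y)
--         return (tesoro_x, jugador_y + sy * (d - adx))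
--
--     return {celda(d) for d in range(adx + ady + 1)}
-- ===== Notes on version B (the rewrite author's own statement) =====
-- stated objective: alternative
-- what changed: Replaces A's stateful cell-by-cell simulation (while loop mutating the player position through four branches) by a stateless parametrization: the cell at Manhattan distance d from the player is given by a closed-form formula, and the path is a single comprehension over d in range(|dx|+|dy|+1).
import Mathlib
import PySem

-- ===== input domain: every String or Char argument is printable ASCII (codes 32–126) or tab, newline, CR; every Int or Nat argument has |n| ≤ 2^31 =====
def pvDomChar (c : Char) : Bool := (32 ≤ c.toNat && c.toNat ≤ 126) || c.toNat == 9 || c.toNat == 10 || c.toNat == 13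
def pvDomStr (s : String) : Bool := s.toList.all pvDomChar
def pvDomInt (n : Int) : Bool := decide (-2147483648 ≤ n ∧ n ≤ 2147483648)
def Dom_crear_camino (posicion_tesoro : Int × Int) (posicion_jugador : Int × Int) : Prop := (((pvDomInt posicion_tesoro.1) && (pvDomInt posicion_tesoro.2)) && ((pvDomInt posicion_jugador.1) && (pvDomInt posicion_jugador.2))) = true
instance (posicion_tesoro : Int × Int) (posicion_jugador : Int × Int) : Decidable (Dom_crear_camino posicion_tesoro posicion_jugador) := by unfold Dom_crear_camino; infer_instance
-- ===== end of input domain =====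

-- B replaces A's stateful cell-by-cell simulation by a stateless closed-form
-- parametrization of the path by Manhattan distance; objective: alternative.

-- ===== PORT A =====
-- literal port of A's while loop; the final inner guard `ty < jy` is Python's last `elif`,
-- whose fallback (returning camino) is unreachable — it only makes the recursion total.
def crear_camino_loop (tx ty jx jy : Int) (camino : PySem.Set (Int × Int)) : PySem.Set (Int × Int) :=
  if (jx, jy) ≠ (tx, ty) then
    if jx < tx then crear_camino_loop tx ty (jx + 1) jy (PySem.Set.add camino (jx + 1, jy))
    else if tx < jx then crear_camino_loop tx ty (jx - 1) jy (PySem.Set.add camino (jx - 1, jy))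
    else if jy < ty then crear_camino_loop tx ty jx (jy + 1) (PySem.Set.add camino (jx, jy + 1))
    else if ty < jy then crear_camino_loop tx ty jx (jy - 1) (PySem.Set.add camino (jx, jy - 1))
    else camino
  else camino
termination_by ((tx - jx).natAbs + (ty - jy).natAbs)
decreasing_by all_goals (simp only [ne_eq, Prod.mk.injEq, not_and] at *; omega)

def crear_camino (posicion_tesoro : Int × Int) (posicion_jugador : Int × Int) : List (Int × Int) :=
  let jugador_x := posicion_jugador.1
  let jugador_y := posicion_jugador.2
  let tesoro_x := posicion_tesoro.1
  let tesoro_y := posicion_tesoro.2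
  crear_camino_loop tesoro_x tesoro_y jugador_x jugador_y
    (PySem.Set.add PySem.Set.empty (jugador_x, jugador_y))

-- ===== PORT B =====
-- Source B's inner helper `celda(d)`: the cell at Manhattan distance d from the player
def celda (tesoro_x jugador_x jugador_y sx sy adx : Int) (d : Int) : Int × Int :=
  if d ≤ adx then (jugador_x + sx * d, jugador_y)
  else (tesoro_x, jugador_y + sy * (d - adx))

def crear_camino_alt (posicion_tesoro : Int × Int) (posicion_jugador : Int × Int) : List (Int × Int) :=
  let tesoro_x := posicion_tesoro.1
  let tesoro_y := posicion_tesoro.2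
  let jugador_x := posicion_jugador.1
  let jugador_y := posicion_jugador.2
  let dx := tesoro_x - jugador_x
  let dy := tesoro_y - jugador_y
  let sx : Int := if dx ≥ 0 then 1 else -1
  let sy : Int := if dy ≥ 0 then 1 else -1
  let adx := |dx|
  let ady := |dy|
  PySem.Set.ofList
    ((PySem.List.pyRange 0 (adx + ady + 1) 1).map (celda tesoro_x jugador_x jugador_y sx sy adx))

-- ===== PRECONDITION & SPEC =====
def Spec_crear_camino (posicion_tesoro : Int × Int) (posicion_jugador : Int × Int) (out : List (Int × Int)) : Prop := out = crear_camino_alt posicion_tesoro posicion_jugador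
instance (posicion_tesoro : Int × Int) (posicion_jugador : Int × Int) (out : List (Int × Int)) : Decidable (Spec_crear_camino posicion_tesoro posicion_jugador out) := by unfold Spec_crear_camino; infer_instance

-- ===== CLAIM (what is proved, stated in full; the proofs are below) =====
def Claim_equal_crear_camino : Prop := ∀ (posicion_tesoro : Int × Int) (posicion_jugador : Int × Int), Dom_crear_camino posicion_tesoro posicion_jugador → Spec_crear_camino posicion_tesoro posicion_jugador (crear_camino posicion_tesoro posicion_jugador)

-- ===== LEMMAS AND PROOFS =====

-- the list of cells A's loop visits after (jx, jy), in visit order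
def pathTail (tx ty jx jy : Int) : List (Int × Int) :=
  if (jx, jy) ≠ (tx, ty) then
    if jx < tx then (jx + 1, jy) :: pathTail tx ty (jx + 1) jy
    else if tx < jx then (jx - 1, jy) :: pathTail tx ty (jx - 1) jy
    else if jy < ty then (jx, jy + 1) :: pathTail tx ty jx (jy + 1)
    else if ty < jy then (jx, jy - 1) :: pathTail tx ty jx (jy - 1)
    else []
  else []
termination_by ((tx - jx).natAbs + (ty - jy).natAbs)
decreasing_by all_goals (simp only [ne_eq, Prod.mk.injEq, not_and] at *; omega)

theorem loop_eq_foldl (tx ty jx jy : Int) (acc : PySem.Set (Int × Int)) :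
    crear_camino_loop tx ty jx jy acc = (pathTail tx ty jx jy).foldl PySem.Set.add acc := by
  fun_induction crear_camino_loop tx ty jx jy acc
  all_goals rw [pathTail]
  all_goals simp only [ne_eq, Prod.mk.injEq, not_and] at *
  all_goals split_ifs <;> first | rfl | omega | simp_all [List.foldl_cons]

-- shifting a unit-step range by one
theorem pyRange_one_shift (b : Int) :
    PySem.List.pyRange 1 (b + 1) 1 = (PySem.List.pyRange 0 b 1).map (· + 1) := by
  rw [PySem.List.pyRange_one, PySem.List.pyRange_one, List.map_map]
  have h : (b + 1 - 1) = b - 0 := by ring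
  rw [h]
  apply List.map_congr_left
  intro k _
  simp [Function.comp]
  omega

-- the parametrized range of Source B enumerates exactly the start cell followed by A's visit list
theorem path_param (tx ty jx jy : Int) :
    ((PySem.List.pyRange 0 (|tx - jx| + |ty - jy| + 1) 1).map
        (celda tx jx jy (if tx - jx ≥ 0 then 1 else -1) (if ty - jy ≥ 0 then 1 else -1) |tx - jx|))
      = (jx, jy) :: pathTail tx ty jx jy := by
  fun_induction pathTail tx ty jx jy with
  | case1 jx jy hne hlt ih =>
    have hpos : (0:Int) < |tx - jx| + |ty - jy| + 1 := by positivity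
    have hD : |tx - jx| + |ty - jy| + 1 = (|tx - (jx + 1)| + |ty - jy| + 1) + 1 := by
      rw [abs_of_nonneg (by omega : (0:Int) ≤ tx - jx),
        abs_of_nonneg (by omega : (0:Int) ≤ tx - (jx + 1))]; ring
    rw [PySem.List.pyRange_one_cons hpos, List.map_cons, hD]
    simp only [zero_add]
    rw [pyRange_one_shift, List.map_map]
    rw [List.cons.injEq]
    constructor
    · simp [celda, abs_nonneg]
    · rw [← ih]
      apply List.map_congr_left
      intro d hd
      have hd0 : 0 ≤ d := ((PySem.List.mem_pyRange_one).mp hd).1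
      simp only [Function.comp, celda,
        abs_of_nonneg (by omega : (0:Int) ≤ tx - jx),
        abs_of_nonneg (by omega : (0:Int) ≤ tx - (jx + 1)),
        if_pos (by omega : tx - jx ≥ 0), if_pos (by omega : tx - (jx + 1) ≥ 0)]
      split_ifs <;> first | (exfalso; omega) | (rw [Prod.mk.injEq]; constructor <;> omega)
  | case2 jx jy hne hx hlt ih =>
    have hpos : (0:Int) < |tx - jx| + |ty - jy| + 1 := by positivity
    have hD : |tx - jx| + |ty - jy| + 1 = (|tx - (jx - 1)| + |ty - jy| + 1) + 1 := by
      rw [abs_of_nonpos (by omega : tx - jx ≤ (0:Int)),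
        abs_of_nonpos (by omega : tx - (jx - 1) ≤ (0:Int))]; ring
    rw [PySem.List.pyRange_one_cons hpos, List.map_cons, hD]
    simp only [zero_add]
    rw [pyRange_one_shift, List.map_map]
    rw [List.cons.injEq]
    constructor
    · simp [celda, abs_nonneg]
    · rw [← ih]
      apply List.map_congr_left
      intro d hd
      have hd0 : 0 ≤ d := ((PySem.List.mem_pyRange_one).mp hd).1
      simp only [Function.comp, celda,
        abs_of_nonpos (by omega : tx - jx ≤ (0:Int)),
        abs_of_nonpos (by omega : tx - (jx - 1) ≤ (0:Int)),
        if_neg (by omega : ¬ tx - jx ≥ 0)]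
      split_ifs <;> first | (exfalso; omega) | (rw [Prod.mk.injEq]; constructor <;> omega)
  | case3 jx jy hne hx1 hx2 hlt ih =>
    have hx : jx = tx := by omega
    subst hx
    have hpos : (0:Int) < |jx - jx| + |ty - jy| + 1 := by positivity
    have hD : |jx - jx| + |ty - jy| + 1 = (|jx - jx| + |ty - (jy + 1)| + 1) + 1 := by
      rw [abs_of_nonneg (by omega : (0:Int) ≤ ty - jy),
        abs_of_nonneg (by omega : (0:Int) ≤ ty - (jy + 1))]; ring
    rw [PySem.List.pyRange_one_cons hpos, List.map_cons, hD]
    simp only [zero_add]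
    rw [pyRange_one_shift, List.map_map]
    rw [List.cons.injEq]
    constructor
    · simp [celda]
    · rw [← ih]
      apply List.map_congr_left
      intro d hd
      have hd0 : 0 ≤ d := ((PySem.List.mem_pyRange_one).mp hd).1
      simp only [Function.comp, celda, sub_self, abs_zero,
        if_pos (by omega : ty - jy ≥ 0), if_pos (by omega : ty - (jy + 1) ≥ 0)]
      split_ifs <;> first | (exfalso; omega) | (rw [Prod.mk.injEq]; constructor <;> omega)
  | case4 jx jy hne hx1 hx2 hy1 hlt ih =>
    have hx : jx = tx := by omega
    subst hx
    have hpos : (0:Int) < |jx - jx| + |ty - jy| + 1 := by positivity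
    have hD : |jx - jx| + |ty - jy| + 1 = (|jx - jx| + |ty - (jy - 1)| + 1) + 1 := by
      rw [abs_of_nonpos (by omega : ty - jy ≤ (0:Int)),
        abs_of_nonpos (by omega : ty - (jy - 1) ≤ (0:Int))]; ring
    rw [PySem.List.pyRange_one_cons hpos, List.map_cons, hD]
    simp only [zero_add]
    rw [pyRange_one_shift, List.map_map]
    rw [List.cons.injEq]
    constructor
    · simp [celda]
    · rw [← ih]
      apply List.map_congr_left
      intro d hd
      have hd0 : 0 ≤ d := ((PySem.List.mem_pyRange_one).mp hd).1
      have hd1 := ((PySem.List.mem_pyRange_one).mp hd).2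
      rw [sub_self, abs_zero, abs_of_nonpos (by omega : ty - (jy - 1) ≤ (0:Int))] at hd1
      simp only [Function.comp, celda, sub_self, abs_zero,
        if_neg (by omega : ¬ ty - jy ≥ 0)]
      split_ifs <;> first | (exfalso; omega) | (rw [Prod.mk.injEq]; constructor <;> omega)
  | case5 jx jy hne hx1 hx2 hy1 hy2 =>
    exfalso
    simp only [ne_eq, Prod.mk.injEq, not_and] at hne
    omega
  | case6 jx jy hne =>
    obtain ⟨hx, hy⟩ : jx = tx ∧ jy = ty := by simpa using hne
    subst hx; subst hy
    have h0 : |jx - jx| + |jy - jy| + 1 = 0 + 1 := by simp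
    rw [h0, PySem.List.pyRange_one_singleton]
    simp [celda]

-- ===== VERDICT (by name: the statement is the Claim_ definition above) =====
theorem crear_camino_spec : Claim_equal_crear_camino := by
  intro pt pj _
  unfold Spec_crear_camino crear_camino crear_camino_alt
  rw [loop_eq_foldl]
  rw [PySem.Set.ofList_eq_foldl, path_param]
  simp [List.foldl, PySem.Set.add, PySem.Set.empty, PySem.Set.contains]
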